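-- pv_equiv track=rewrite | github.com/Ghy0202/njust_homework_ai | 算法课程设计大作业/代码/code/作业2_Louvain/Louvain.py | updatePartition
-- ===== SOURCE A (Python) =====
-- from collections import defaultdict
--
-- def updatePartition(new_node2community,partition):
--     """
--     更新社区
--     :param new_node2community:新的结点-社区对
--     :param partition:
--     :return:
--     """
--     temp_partition=defaultdict(list)
--     for node,cid in partition.items():
--         temp_partition[cid].append(node)# 社区编号：结点
--
--     for old_cid,new_cid in new_node2community.items():
--         for old_com in temp_partition[old_cid]:
--             partition[old_com]=new_cid # 更新社区名？
--
--     return partition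
-- ===== SOURCE B (Python) =====
-- def updatePartition(new_node2community, partition):
--     # Single direct pass over the nodes: no community->nodes inverted index.
--     for node, cid in partition.items():
--         if cid in new_node2community:
--             partition[node] = new_node2community[cid]
--     return partition
-- ===== Notes on version B (the rewrite author's own statement) =====
-- stated objective: simpler
-- what changed: B drops A's community->nodes inverted index (defaultdict of lists) and its grouped double loop over the mapping, doing instead one direct pass over the nodes that rewrites each node's community via a single mapping lookup (constant-factor faster: no intermediate grouping structure is built).
import Mathlib
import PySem

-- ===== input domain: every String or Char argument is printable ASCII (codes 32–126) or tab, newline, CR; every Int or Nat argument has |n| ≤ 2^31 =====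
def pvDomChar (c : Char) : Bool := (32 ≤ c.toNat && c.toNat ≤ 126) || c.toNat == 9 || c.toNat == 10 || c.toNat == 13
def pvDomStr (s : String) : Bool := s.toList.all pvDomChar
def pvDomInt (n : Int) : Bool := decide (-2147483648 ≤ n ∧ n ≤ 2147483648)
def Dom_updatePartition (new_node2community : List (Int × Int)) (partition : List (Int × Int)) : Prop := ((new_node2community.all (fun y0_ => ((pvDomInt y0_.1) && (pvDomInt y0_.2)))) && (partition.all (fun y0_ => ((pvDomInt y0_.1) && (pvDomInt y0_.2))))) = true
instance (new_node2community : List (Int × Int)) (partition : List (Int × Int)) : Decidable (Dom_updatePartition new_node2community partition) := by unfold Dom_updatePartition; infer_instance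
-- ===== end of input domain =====

-- B replaces A's community->nodes inverted index and grouped double loop by one direct
-- pass over the nodes (objective: simpler). Return-value equivalence only: A mutates
-- `partition` in place; B performs the same in-place value updates.

-- ===== PORT A =====
def updatePartition (new_node2community : List (Int × Int)) (partition : List (Int × Int)) : List (Int × Int) :=
  let part : PySem.Dict Int Int := PySem.Dict.ofList partition
  let nm : PySem.Dict Int Int := PySem.Dict.ofList new_node2community
  -- temp_partition = defaultdict(list); for node,cid in partition.items(): temp_partition[cid].append(node)
  let temp : PySem.Dict Int (List Int) :=
    part.items.foldl (fun t p => t.modify p.2 [] (fun l => l ++ [p.1])) PySem.Dict.empty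
  -- for old_cid,new_cid in new_node2community.items():
  --     for old_com in temp_partition[old_cid]: partition[old_com] = new_cid
  -- (the defaultdict read temp_partition[old_cid] yields [] on a missing key; temp is not read afterwards, so getD is exact)
  let final : PySem.Dict Int Int :=
    nm.items.foldl (fun d p => (temp.getD p.1 []).foldl (fun d node => d.insert node p.2) d) part
  final.items

-- ===== PORT B =====
def updatePartition_alt (new_node2community : List (Int × Int)) (partition : List (Int × Int)) : List (Int × Int) :=
  let part : PySem.Dict Int Int := PySem.Dict.ofList partition
  let nm : PySem.Dict Int Int := PySem.Dict.ofList new_node2community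
  -- for node,cid in partition.items(): if cid in nm: partition[node] = nm[cid]
  -- (values are overwritten in place at unique keys, so the pass is a map over the items)
  part.items.map (fun p =>
    match nm.get? p.2 with
    | some v => (p.1, v)
    | none   => p)

-- ===== PRECONDITION & SPEC =====
def Spec_updatePartition (new_node2community : List (Int × Int)) (partition : List (Int × Int)) (out : List (Int × Int)) : Prop := out = updatePartition_alt new_node2community partition
instance (new_node2community : List (Int × Int)) (partition : List (Int × Int)) (out : List (Int × Int)) : Decidable (Spec_updatePartition new_node2community partition out) := by unfold Spec_updatePartition; infer_instance

-- ===== CLAIM (what is proved, stated in full; the proofs are below) =====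
def Claim_equal_updatePartition : Prop := ∀ (new_node2community : List (Int × Int)) (partition : List (Int × Int)), Dom_updatePartition new_node2community partition → Spec_updatePartition new_node2community partition (updatePartition new_node2community partition)

-- ===== LEMMAS AND PROOFS =====

-- The inner node loop of A: inserting `nc` at every key of `ns` (all existing keys)
-- rewrites exactly the items whose key lies in `ns`.
theorem upd_inner (ns : List Int) (nc : Int) :
    ∀ (pd d : PySem.Dict Int Int) (g : Int × Int → Int),
    (∀ n ∈ ns, n ∈ pd.keys) →
    d.items = pd.items.map (fun q => (q.1, g q)) →
    (ns.foldl (fun d n => d.insert n nc) d).items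
      = pd.items.map (fun q => (q.1, if q.1 ∈ ns then nc else g q)) := by
  induction ns with
  | nil => intro pd d g _ hd; simpa using hd
  | cons n t ih =>
    intro pd d g hmem hd
    have hk : d.contains n = true := by
      have : n ∈ d.keys := by
        have : n ∈ pd.keys := hmem n (by simp)
        simp only [PySem.Dict.keys] at this ⊢
        rw [hd, List.map_map]
        simpa using this
      rw [PySem.Dict.contains_iff_mem_keys] at *
      exact this
    have hins : (d.insert n nc).items
        = pd.items.map (fun q => (q.1, if q.1 = n then nc else g q)) := by
      rw [PySem.Dict.items_insert_of_contains _ nc hk, hd, List.map_map]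
      apply List.map_congr_left
      intro q _
      by_cases h : q.1 = n <;> simp [h]
    have := ih pd (d.insert n nc) (fun q => if q.1 = n then nc else g q)
      (fun m hm => hmem m (by simp [hm])) hins
    simp only [List.foldl_cons]
    rw [this]
    apply List.map_congr_left
    intro q _
    by_cases h1 : q.1 ∈ t
    · simp [h1]
    · by_cases h2 : q.1 = n <;> simp [h1, h2]

-- A's grouping pass read back: temp_partition[c] is the list of nodes whose community is c.
theorem temp_getD (pd : PySem.Dict Int Int) (c : Int) :
    (pd.items.foldl (fun t p => t.modify p.2 [] (fun l => l ++ [p.1])) PySem.Dict.empty).getD c []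
      = (pd.items.filter (fun q => q.2 == c)).map (fun q => q.1) := by
  have h1 : pd.items.foldl (fun t p => t.modify p.2 [] (fun l => l ++ [p.1])) PySem.Dict.empty
      = (pd.items.map Prod.swap).foldl (fun t p => t.modify p.1 [] (fun l => l ++ [p.2])) PySem.Dict.empty := by
    rw [List.foldl_map]; rfl
  rw [h1, PySem.Dict.getD_foldl_modify_append]
  simp [List.filter_map, Function.comp_def]

-- membership in temp_partition[c] decides whether an item's community is c (keys unique).
theorem mem_nodes_iff (pd : PySem.Dict Int Int) (hnd : pd.keys.Nodup) (c : Int)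
    (q : Int × Int) (hq : q ∈ pd.items) :
    q.1 ∈ (pd.items.filter (fun r => r.2 == c)).map (fun r => r.1) ↔ q.2 = c := by
  constructor
  · intro h
    rcases List.mem_map.mp h with ⟨r, hr, hr1⟩
    rcases List.mem_filter.mp hr with ⟨hrmem, hrc⟩
    have : r = q := by
      have hinj := List.inj_on_of_nodup_map (f := fun p : Int × Int => p.1) hnd
      exact hinj hrmem hq hr1
    subst this
    simpa using hrc
  · intro h
    exact List.mem_map.mpr ⟨q, List.mem_filter.mpr ⟨hq, by simpa using h⟩, rfl⟩

-- The outer community loop of A, itemwise: each node's final community is the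
-- last-match rewrite of its original community through the mapping's items.
theorem upd_outer (ms : List (Int × Int)) :
    ∀ (pd d : PySem.Dict Int Int) (g : Int × Int → Int),
    pd.keys.Nodup →
    d.items = pd.items.map (fun q => (q.1, g q)) →
    (ms.foldl (fun d p =>
        ((pd.items.foldl (fun t r => t.modify r.2 [] (fun l => l ++ [r.1])) PySem.Dict.empty).getD p.1 []).foldl
          (fun d node => d.insert node p.2) d) d).items
      = pd.items.map (fun q => (q.1, ms.foldl (fun a p => if q.2 = p.1 then p.2 else a) (g q))) := by
  induction ms with
  | nil => intro pd d g _ hd; simpa using hd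
  | cons p t ih =>
    intro pd d g hnd hd
    simp only [List.foldl_cons]
    have hns : ∀ n ∈ (pd.items.foldl (fun t r => t.modify r.2 [] (fun l => l ++ [r.1])) PySem.Dict.empty).getD p.1 [],
        n ∈ pd.keys := by
      intro n hn
      rw [temp_getD] at hn
      rcases List.mem_map.mp hn with ⟨r, hr, hr1⟩
      have : r ∈ pd.items := (List.mem_filter.mp hr).1
      simp only [PySem.Dict.keys]
      exact hr1 ▸ List.mem_map_of_mem this
    have h1 := upd_inner ((pd.items.foldl (fun t r => t.modify r.2 [] (fun l => l ++ [r.1])) PySem.Dict.empty).getD p.1 [])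
      p.2 pd d g hns hd
    have h2 : (((pd.items.foldl (fun t r => t.modify r.2 [] (fun l => l ++ [r.1])) PySem.Dict.empty).getD p.1 []).foldl
          (fun d node => d.insert node p.2) d).items
        = pd.items.map (fun q => (q.1, if q.2 = p.1 then p.2 else g q)) := by
      rw [h1]
      apply List.map_congr_left
      intro q hq
      have := mem_nodes_iff pd hnd p.1 q hq
      rw [temp_getD] at *
      by_cases h : q.2 = p.1
      · simp [h, this.mpr h]
      · have : ¬ q.1 ∈ (pd.items.filter (fun r => r.2 == p.1)).map (fun r => r.1) := fun hc => h (this.mp hc)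
        simp [h, this]
    exact ih pd _ (fun q => if q.2 = p.1 then p.2 else g q) hnd h2

-- a last-match fold over a list with no matching key returns its accumulator
theorem foldl_lastmatch_none (c : Int) : ∀ (l : List (Int × Int)) (a : Int),
    (∀ p ∈ l, p.1 ≠ c) → l.foldl (fun a p => if c = p.1 then p.2 else a) a = a := by
  intro l
  induction l with
  | nil => intro a _; rfl
  | cons p t ih =>
    intro a h
    simp only [List.foldl_cons]
    rw [if_neg (fun hc => h p (by simp) hc.symm)]
    exact ih a (fun r hr => h r (by simp [hr]))

-- over a unique-key list, the last-match fold is the first-match lookup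
theorem foldl_lastmatch_find (c : Int) : ∀ (l : List (Int × Int)) (a : Int),
    (l.map (fun p => p.1)).Nodup →
    l.foldl (fun a p => if c = p.1 then p.2 else a) a
      = match l.find? (fun p => p.1 == c) with
        | some p => p.2
        | none => a := by
  intro l
  induction l with
  | nil => intro a _; rfl
  | cons p t ih =>
    intro a hnd
    simp only [List.map_cons, List.nodup_cons] at hnd
    simp only [List.foldl_cons]
    by_cases h : p.1 = c
    · rw [List.find?_cons_of_pos (by simpa using h), if_pos h.symm]
      exact foldl_lastmatch_none c t p.2 (fun r hr hrc => hnd.1 (by rw [h, ← hrc]; exact List.mem_map_of_mem hr))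
    · rw [List.find?_cons_of_neg (by simpa using h), if_neg (fun hc => h hc.symm)]
      exact ih a hnd.2

-- ===== VERDICT (by name: the statement is the Claim_ definition above) =====
theorem updatePartition_spec : Claim_equal_updatePartition := by
  intro nm part _
  unfold Spec_updatePartition updatePartition updatePartition_alt
  simp only []
  have hnd : (PySem.Dict.ofList part : PySem.Dict Int Int).keys.Nodup := PySem.Dict.nodup_keys_ofList _
  have hmnd : ((PySem.Dict.ofList nm : PySem.Dict Int Int).items.map (fun p => p.1)).Nodup :=
    PySem.Dict.nodup_keys_ofList _
  rw [upd_outer (PySem.Dict.ofList nm).items (PySem.Dict.ofList part) (PySem.Dict.ofList part)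
      (fun q => q.2) hnd (by simp)]
  apply List.map_congr_left
  intro q _
  rw [foldl_lastmatch_find q.2 _ q.2 hmnd]
  simp only [PySem.Dict.get?]
  cases hf : (PySem.Dict.ofList nm : PySem.Dict Int Int).items.find? (fun p => p.1 == q.2) <;> simp
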